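-- pv_equiv track=rewrite | github.com/thanhlongnt/Amazon-ELT-and-Recommendation-System | src/amazon_next_category/pipeline/create_sequences.py | build_category_index
-- ===== SOURCE A (Python) =====
-- from typing import Dict, List, Optional
--
-- def build_category_index(categories: List[str]) -> Dict[str, int]:
--     """Map category name -> integer index (0 reserved for 'Unknown')."""
--     cat_to_idx: Dict[str, int] = {"Unknown": 0}
--     idx = 1
--     for cat in categories:
--         if cat not in cat_to_idx:
--             cat_to_idx[cat] = idx
--             idx += 1
--     return cat_to_idx
-- ===== SOURCE B (Python) =====
-- def build_category_index(categories):
--     """Map category name -> integer index (0 reserved for 'Unknown')."""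
--     first_pos = {}
--     for pos, cat in enumerate(categories):
--         if cat != "Unknown":
--             first_pos.setdefault(cat, pos)
--     result = {"Unknown": 0}
--     for rank, cat in enumerate(sorted(first_pos, key=first_pos.__getitem__), 1):
--         result[cat] = rank
--     return result
-- ===== Notes on version B (the rewrite author's own statement) =====
-- stated objective: alternative
-- what changed: Instead of A's online running counter with a membership guard, B records each non-'Unknown' category's first position via setdefault in one pass, then sorts the recorded names by that first position and numbers them from 1 under the reserved 'Unknown': 0 entry.
import Mathlib
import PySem

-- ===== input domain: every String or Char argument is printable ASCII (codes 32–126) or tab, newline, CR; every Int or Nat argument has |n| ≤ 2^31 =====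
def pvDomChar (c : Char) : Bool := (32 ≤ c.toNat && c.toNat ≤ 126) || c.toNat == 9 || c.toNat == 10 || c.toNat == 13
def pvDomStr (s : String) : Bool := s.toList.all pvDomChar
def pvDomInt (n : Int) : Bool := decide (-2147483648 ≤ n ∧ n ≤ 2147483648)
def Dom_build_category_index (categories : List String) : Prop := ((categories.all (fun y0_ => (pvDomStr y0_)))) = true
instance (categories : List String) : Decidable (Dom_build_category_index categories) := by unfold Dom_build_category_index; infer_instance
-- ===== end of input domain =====

-- B replaces A's online running-counter/membership loop by record-first-positions then sort-by-position then number; alternative algorithm, same results.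

-- ===== PORT A =====
-- the for-loop of A as a structural recursion over the same state (dict, idx)
def build_category_index_loopA (cats : List String) (d : PySem.Dict String Int) (idx : Int) :
    PySem.Dict String Int :=
  match cats with
  | [] => d
  | c :: cs =>
    if d.contains c then build_category_index_loopA cs d idx
    else build_category_index_loopA cs (d.insert c idx) (idx + 1)

def build_category_index (categories : List String) : List (String × Int) :=
  (build_category_index_loopA categories (PySem.Dict.ofList [("Unknown", 0)]) 1).items

-- ===== PORT B =====
-- first loop: for pos, cat in enumerate(categories): if cat != "Unknown": first_pos.setdefault(cat, pos)
def build_category_index_firstPos (categories : List String) : PySem.Dict String Int :=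
  (PySem.List.enumerate categories 0).foldl
    (fun d p => if p.2 ≠ "Unknown" then d.setdefault p.2 p.1 else d) PySem.Dict.empty

-- sorted(first_pos, key=first_pos.__getitem__): every key is in first_pos, so getD is exact here
def build_category_index_alt (categories : List String) : List (String × Int) :=
  ((PySem.List.enumerate
      (PySem.List.sorted (build_category_index_firstPos categories).keys
        (fun c => (build_category_index_firstPos categories).getD c 0) false) 1).foldl
    (fun d p => d.insert p.2 p.1) (PySem.Dict.ofList [("Unknown", 0)])).items

-- ===== PRECONDITION & SPEC =====
def Spec_build_category_index (categories : List String) (out : List (String × Int)) : Prop := out = build_category_index_alt categories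
instance (categories : List String) (out : List (String × Int)) : Decidable (Spec_build_category_index categories out) := by unfold Spec_build_category_index; infer_instance

-- ===== CLAIM (what is proved, stated in full; the proofs are below) =====
def Claim_equal_build_category_index : Prop := ∀ (categories : List String), Dom_build_category_index categories → Spec_build_category_index categories (build_category_index categories)

-- ===== LEMMAS AND PROOFS =====

-- the keys A's loop appends: first occurrences of l not already in seen, in order
def pvNewKeys (l : List String) (seen : List String) : List String :=
  match l with
  | [] => []
  | c :: cs => if c ∈ seen then pvNewKeys cs seen else c :: pvNewKeys cs (seen ++ [c])

-- number a list of keys consecutively from idx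
def pvNumFrom (idx : Int) (l : List String) : List (String × Int) :=
  match l with
  | [] => []
  | c :: cs => (c, idx) :: pvNumFrom (idx + 1) cs

-- the (key, first position) pairs B's first loop appends
def pvFirstItems (l : List String) (s : Int) (seen : List String) : List (String × Int) :=
  match l with
  | [] => []
  | c :: t =>
    if c = "Unknown" ∨ c ∈ seen then pvFirstItems t (s + 1) seen
    else (c, s) :: pvFirstItems t (s + 1) (seen ++ [c])

theorem pvLoopA_items : ∀ (l : List String) (d : PySem.Dict String Int) (idx : Int),
    d.keys.Nodup →
    (build_category_index_loopA l d idx).items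
      = d.items ++ pvNumFrom idx (pvNewKeys l d.keys) := by
  intro l
  induction l with
  | nil => intro d idx _; simp [build_category_index_loopA, pvNewKeys, pvNumFrom]
  | cons c cs ih =>
    intro d idx hnd
    by_cases hc : d.contains c
    · have hmem : c ∈ d.keys := (PySem.Dict.contains_iff_mem_keys d c).1 hc
      simp [build_category_index_loopA, hc, pvNewKeys, hmem, ih d idx hnd]
    · have hmem : c ∉ d.keys := fun h => hc ((PySem.Dict.contains_iff_mem_keys d c).2 h)
      have hcf : d.contains c = false := by simpa using hc
      have hk : (d.insert c idx).keys = d.keys ++ [c] :=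
        PySem.Dict.keys_insert_of_not_contains d idx hcf
      have hnd' : (d.insert c idx).keys.Nodup := PySem.Dict.nodup_keys_insert d c idx hnd
      have hi : (d.insert c idx).items = d.items ++ [(c, idx)] :=
        PySem.Dict.items_insert_of_not_contains d idx hcf
      simp [build_category_index_loopA, hcf, ih (d.insert c idx) (idx + 1) hnd', hk, hi,
        pvNewKeys, hmem, pvNumFrom]

theorem pvNewKeys_not_mem_seen : ∀ (l seen : List String) (x : String),
    x ∈ pvNewKeys l seen → x ∉ seen := by
  intro l
  induction l with
  | nil => intro seen x hx; simp [pvNewKeys] at hx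
  | cons c cs ih =>
    intro seen x hx
    by_cases hcs : c ∈ seen
    · rw [show pvNewKeys (c :: cs) seen = pvNewKeys cs seen from by simp [pvNewKeys, hcs]] at hx
      exact ih seen x hx
    · rw [show pvNewKeys (c :: cs) seen = c :: pvNewKeys cs (seen ++ [c]) from by
        simp [pvNewKeys, hcs]] at hx
      rcases List.mem_cons.1 hx with h | h
      · exact h ▸ hcs
      · intro hmem
        exact ih (seen ++ [c]) x h (List.mem_append.2 (Or.inl hmem))

theorem pvNewKeys_nodup : ∀ (l seen : List String), (pvNewKeys l seen).Nodup := by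
  intro l
  induction l with
  | nil => intro seen; simp [pvNewKeys]
  | cons c cs ih =>
    intro seen
    by_cases hcs : c ∈ seen
    · simpa [pvNewKeys, hcs] using ih seen
    · rw [show pvNewKeys (c :: cs) seen = c :: pvNewKeys cs (seen ++ [c]) from by
        simp [pvNewKeys, hcs]]
      refine List.nodup_cons.2 ⟨fun h => ?_, ih (seen ++ [c])⟩
      exact pvNewKeys_not_mem_seen cs (seen ++ [c]) c h (by simp)

-- B's first loop, characterised
theorem pvLoopB1_items : ∀ (l : List String) (s : Int) (d : PySem.Dict String Int),
    ((PySem.List.enumerate l s).foldl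
        (fun d p => if p.2 ≠ "Unknown" then d.setdefault p.2 p.1 else d) d).items
      = d.items ++ pvFirstItems l s d.keys := by
  intro l
  induction l with
  | nil => intro s d; simp [PySem.List.enumerate_nil, pvFirstItems]
  | cons c t ih =>
    intro s d
    rw [PySem.List.enumerate_cons]
    simp only [List.foldl_cons]
    by_cases hu : c = "Unknown"
    · rw [if_neg (by simp [hu])]
      rw [ih (s + 1) d,
        show pvFirstItems (c :: t) s d.keys = pvFirstItems t (s + 1) d.keys from by
          simp [pvFirstItems, hu]]
    · by_cases hc : d.contains c = true
      · have hmem : c ∈ d.keys := (PySem.Dict.contains_iff_mem_keys d c).1 hc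
        rw [if_pos (by simpa using hu), PySem.Dict.setdefault_of_contains d s hc]
        rw [ih (s + 1) d,
          show pvFirstItems (c :: t) s d.keys = pvFirstItems t (s + 1) d.keys from by
            simp [pvFirstItems, hmem]]
      · have hmem : c ∉ d.keys := fun h => hc ((PySem.Dict.contains_iff_mem_keys d c).2 h)
        have hcf : d.contains c = false := by simpa using hc
        rw [if_pos (by simpa using hu), PySem.Dict.setdefault_of_not_contains d s hcf]
        rw [ih (s + 1) (d.insert c s),
          PySem.Dict.items_insert_of_not_contains d s hcf,
          PySem.Dict.keys_insert_of_not_contains d s hcf,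
          show pvFirstItems (c :: t) s d.keys
              = (c, s) :: pvFirstItems t (s + 1) (d.keys ++ [c]) from by
            simp [pvFirstItems, hu, hmem]]
        simp

-- the keys B's first loop collects are A's new keys with "Unknown" pre-seen
theorem pvFirstItems_fst : ∀ (l : List String) (s : Int) (s1 s2 : List String),
    (∀ x, x ∈ s2 ↔ x = "Unknown" ∨ x ∈ s1) →
    (pvFirstItems l s s1).map Prod.fst = pvNewKeys l s2 := by
  intro l
  induction l with
  | nil => intro s s1 s2 _; simp [pvFirstItems, pvNewKeys]
  | cons c t ih =>
    intro s s1 s2 hiff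
    by_cases h : c = "Unknown" ∨ c ∈ s1
    · have h2 : c ∈ s2 := (hiff c).2 h
      simp only [pvFirstItems, pvNewKeys, if_pos h, if_pos h2]
      exact ih (s + 1) s1 s2 hiff
    · have h2 : c ∉ s2 := fun hm => h ((hiff c).1 hm)
      simp only [pvFirstItems, pvNewKeys, if_neg h, if_neg h2, List.map_cons]
      refine congrArg (c :: ·) (ih (s + 1) (s1 ++ [c]) (s2 ++ [c]) fun x => ?_)
      constructor
      · intro hx
        rcases List.mem_append.1 hx with hx | hx
        · rcases (hiff x).1 hx with hx | hx
          · exact Or.inl hx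
          · exact Or.inr (List.mem_append.2 (Or.inl hx))
        · exact Or.inr (List.mem_append.2 (Or.inr hx))
      · intro hx
        rcases hx with hx | hx
        · exact List.mem_append.2 (Or.inl ((hiff x).2 (Or.inl hx)))
        · rcases List.mem_append.1 hx with hx | hx
          · exact List.mem_append.2 (Or.inl ((hiff x).2 (Or.inr hx)))
          · exact List.mem_append.2 (Or.inr hx)

theorem pvFirstItems_lb : ∀ (l : List String) (s : Int) (seen : List String)
    (p : String × Int), p ∈ pvFirstItems l s seen → s ≤ p.2 := by
  intro l
  induction l with
  | nil => intro s seen p hp; simp [pvFirstItems] at hp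
  | cons c t ih =>
    intro s seen p hp
    by_cases h : c = "Unknown" ∨ c ∈ seen
    · rw [show pvFirstItems (c :: t) s seen = pvFirstItems t (s + 1) seen from by
        simp [pvFirstItems, h]] at hp
      have := ih (s + 1) seen p hp; omega
    · rw [show pvFirstItems (c :: t) s seen = (c, s) :: pvFirstItems t (s + 1) (seen ++ [c])
          from by simp [pvFirstItems, h]] at hp
      rcases List.mem_cons.1 hp with hp | hp
      · simp [hp]
      · have := ih (s + 1) (seen ++ [c]) p hp; omega

theorem pvFirstItems_pairwise : ∀ (l : List String) (s : Int) (seen : List String),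
    (pvFirstItems l s seen).Pairwise (fun p q => p.2 < q.2) := by
  intro l
  induction l with
  | nil => intro s seen; simp [pvFirstItems]
  | cons c t ih =>
    intro s seen
    by_cases h : c = "Unknown" ∨ c ∈ seen
    · simpa [pvFirstItems, h] using ih (s + 1) seen
    · rw [show pvFirstItems (c :: t) s seen = (c, s) :: pvFirstItems t (s + 1) (seen ++ [c])
          from by simp [pvFirstItems, h]]
      refine List.pairwise_cons.2 ⟨fun q hq => ?_, ih (s + 1) (seen ++ [c])⟩
      have := pvFirstItems_lb t (s + 1) (seen ++ [c]) q hq; omega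

-- B's second loop over fresh keys: numbering from s
theorem pvEnumSwap : ∀ (ks : List String) (s : Int),
    (PySem.List.enumerate ks s).map (fun p => (p.2, p.1)) = pvNumFrom s ks := by
  intro ks
  induction ks with
  | nil => intro s; simp [PySem.List.enumerate_nil, pvNumFrom]
  | cons c t ih => intro s; simp [PySem.List.enumerate_cons, pvNumFrom, ih (s + 1)]

-- ===== VERDICT (by name: the statement is the Claim_ definition above) =====
theorem build_category_index_spec : Claim_equal_build_category_index := by
  intro categories _
  unfold Spec_build_category_index build_category_index build_category_index_alt
  -- A's side
  have hnd : (PySem.Dict.ofList ([("Unknown", (0 : Int))])).keys.Nodup := by decide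
  have hkeys0 : (PySem.Dict.ofList ([("Unknown", (0 : Int))])).keys = ["Unknown"] := by decide
  have hitems0 : (PySem.Dict.ofList ([("Unknown", (0 : Int))])).items
      = [("Unknown", (0 : Int))] := by decide
  rw [pvLoopA_items categories _ 1 hnd, hkeys0, hitems0]
  -- B's first loop
  set fp := build_category_index_firstPos categories with hfp
  have hfpItems : fp.items = pvFirstItems categories 0 [] := by
    rw [hfp]
    unfold build_category_index_firstPos
    rw [pvLoopB1_items categories 0 PySem.Dict.empty]
    simp [PySem.Dict.empty, PySem.Dict.keys]
  have hfpKeys : fp.keys = pvNewKeys categories ["Unknown"] := by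
    show fp.items.map Prod.fst = _
    rw [hfpItems]
    exact pvFirstItems_fst categories 0 [] ["Unknown"] (fun x => by simp)
  have hndfp : fp.keys.Nodup := by rw [hfpKeys]; exact pvNewKeys_nodup categories ["Unknown"]
  -- the recorded keys are already in increasing first-position order: sorted is the identity
  have hpw : fp.keys.Pairwise (fun a b => fp.getD a 0 ≤ fp.getD b 0) := by
    show (fp.items.map Prod.fst).Pairwise _
    rw [List.pairwise_map]
    have hpw0 : fp.items.Pairwise (fun p q => p.2 < q.2) := by
      rw [hfpItems]; exact pvFirstItems_pairwise categories 0 []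
    refine hpw0.imp_of_mem (fun {p q} hp hq hlt => ?_)
    obtain ⟨pk, pv⟩ := p
    obtain ⟨qk, qv⟩ := q
    rw [PySem.Dict.getD_of_mem_items fp hp hndfp 0, PySem.Dict.getD_of_mem_items fp hq hndfp 0]
    simpa using le_of_lt hlt
  rw [PySem.List.sorted_eq_self_of_pairwise fp.keys (fun c => fp.getD c 0) hpw]
  -- B's second loop appends fresh keys
  have hUnk : "Unknown" ∉ fp.keys := by
    rw [hfpKeys]
    intro h
    exact pvNewKeys_not_mem_seen categories ["Unknown"] "Unknown" h (by simp)
  have hfresh : ∀ p ∈ PySem.List.enumerate fp.keys 1,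
      (PySem.Dict.ofList ([("Unknown", (0 : Int))])).contains p.2 = false := by
    intro p hp
    have hmem : p.2 ∈ fp.keys := by
      rcases (PySem.List.mem_enumerate_iff _ _ _).1 hp with ⟨k, hk, rfl⟩
      exact List.getElem_mem hk
    have hne : p.2 ≠ "Unknown" := fun h => hUnk (h ▸ hmem)
    rw [PySem.Dict.contains_eq_decide_mem_keys, hkeys0]
    simp [hne]
  have hmapnd : ((PySem.List.enumerate fp.keys 1).map (fun p => p.2)).Nodup := by
    rw [PySem.List.map_snd_enumerate]; exact hndfp
  rw [PySem.Dict.items_foldl_insert_fresh (PySem.List.enumerate fp.keys 1)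
      (fun p => p.2) (fun p => p.1) _ hfresh hmapnd, hitems0, pvEnumSwap fp.keys 1, hfpKeys]
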